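-- pv_equiv track=rewrite | github.com/cloudfreefly/Full-CNN-LSTM-Attention | feature_engineering.py | _count_consecutive_nans
-- ===== SOURCE A (Python) =====
-- def _count_consecutive_nans(nan_mask):
--     """计算最大连续NaN数量"""
--     max_consecutive = 0
--     current_consecutive = 0
--
--     for is_nan in nan_mask:
--         if is_nan:
--             current_consecutive += 1
--             max_consecutive = max(max_consecutive, current_consecutive)
--         else:
--             current_consecutive = 0
--
--     return max_consecutive
-- ===== SOURCE B (Python) =====
-- from itertools import groupby
--
-- def _count_consecutive_nans(nan_mask):
--     """计算最大连续NaN数量"""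
--     return max((sum(1 for _ in g) for k, g in groupby(bool(x) for x in nan_mask) if k),
--                default=0)
-- ===== Notes on version B (the rewrite author's own statement) =====
-- stated objective: idiomatic
-- what changed: Replaces the explicit running-counter/running-max loop with itertools.groupby: partition the mask into maximal runs of equal truth value and take the max length of the truthy runs.
import Mathlib
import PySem

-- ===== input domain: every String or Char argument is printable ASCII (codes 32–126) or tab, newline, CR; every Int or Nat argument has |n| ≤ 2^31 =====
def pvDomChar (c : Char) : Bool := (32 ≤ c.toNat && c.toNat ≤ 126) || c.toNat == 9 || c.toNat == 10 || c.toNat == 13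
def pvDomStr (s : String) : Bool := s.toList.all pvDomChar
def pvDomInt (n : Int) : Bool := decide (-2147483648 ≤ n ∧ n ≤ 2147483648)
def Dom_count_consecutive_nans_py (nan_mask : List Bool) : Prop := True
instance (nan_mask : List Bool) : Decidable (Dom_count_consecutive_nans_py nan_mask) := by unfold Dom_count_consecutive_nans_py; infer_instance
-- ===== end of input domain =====

-- B replaces A's running-counter/running-max loop with a run-partition (groupby) and a max-reduce over the truthy runs; objective: idiomatic.


-- ===== PORT A =====
-- explicit loop over the mask carrying (max_consecutive, current_consecutive)
def count_consecutive_nans_py (nan_mask : List Bool) : Int :=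
  (nan_mask.foldl
    (fun (s : Int × Int) is_nan =>
      if is_nan then (max s.1 (s.2 + 1), s.2 + 1) else (s.1, 0))
    (0, 0)).1

-- ===== PORT B =====
-- groupby: peel off maximal runs; a falsy run is skipped, a truthy run's length
-- enters the max-reduction (default 0 for no truthy run).
def pvRuns (l : List Bool) : Int :=
  match l with
  | [] => 0
  | false :: t => pvRuns t
  | true :: t =>
      max (1 + (t.takeWhile (fun b => b)).length)
          (pvRuns (t.dropWhile (fun b => b)))
termination_by l.length
decreasing_by
  all_goals have := List.length_dropWhile_le (p := fun b => b) (l := t)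
  all_goals simp_all

def count_consecutive_nans_py_alt (nan_mask : List Bool) : Int := pvRuns nan_mask

-- ===== PRECONDITION & SPEC =====
def Spec_count_consecutive_nans_py (nan_mask : List Bool) (out : Int) : Prop := out = count_consecutive_nans_py_alt nan_mask
instance (nan_mask : List Bool) (out : Int) : Decidable (Spec_count_consecutive_nans_py nan_mask out) := by unfold Spec_count_consecutive_nans_py; infer_instance

-- ===== CLAIM (what is proved, stated in full; the proofs are below) =====
def Claim_equal_count_consecutive_nans_py : Prop := ∀ (nan_mask : List Bool), Dom_count_consecutive_nans_py nan_mask → Spec_count_consecutive_nans_py nan_mask (count_consecutive_nans_py nan_mask)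

-- ===== LEMMAS AND PROOFS =====

theorem pvRuns_nonneg (l : List Bool) : 0 ≤ pvRuns l := by
  induction l using pvRuns.induct with
  | case1 => simp [pvRuns]
  | case2 t ih => simpa [pvRuns] using ih
  | case3 t ih => simp only [pvRuns]; omega

-- pvRuns characterised by the leading true-run and the rest
theorem pvRuns_split (l : List Bool) :
    pvRuns l = max ((l.takeWhile (fun b => b)).length : Int)
                   (pvRuns (l.dropWhile (fun b => b))) := by
  match l with
  | [] => simp [pvRuns]
  | false :: t =>
      have := pvRuns_nonneg t
      simp [pvRuns, List.takeWhile, List.dropWhile]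
      omega
  | true :: t =>
      simp [pvRuns, List.takeWhile, List.dropWhile]
      omega

-- invariant of A's fold
theorem foldA_inv (l : List Bool) (m c : Int) (h0 : 0 ≤ c) (h1 : c ≤ m) :
    (l.foldl (fun (s : Int × Int) is_nan =>
        if is_nan then (max s.1 (s.2 + 1), s.2 + 1) else (s.1, 0)) (m, c)).1
      = max m (max (c + ((l.takeWhile (fun b => b)).length : Int))
                   (pvRuns (l.dropWhile (fun b => b)))) := by
  induction l generalizing m c with
  | nil =>
      have := pvRuns_nonneg ([] : List Bool)
      simp [pvRuns]; omega
  | cons b t ih =>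
      cases b with
      | true =>
          have H := ih (max m (c + 1)) (c + 1) (by omega) (by omega)
          simp only [List.foldl_cons] at *
          simp [List.takeWhile, List.dropWhile] at *
          omega
      | false =>
          have H := ih m 0 le_rfl (by omega)
          have hf : pvRuns (false :: t) = pvRuns t := by simp only [pvRuns]
          have hs := pvRuns_split t
          have h1 := pvRuns_nonneg (t.dropWhile (fun b => b))
          simp only [List.foldl_cons] at *
          simp [List.takeWhile, List.dropWhile] at *
          omega

-- ===== VERDICT (by name: the statement is the Claim_ definition above) =====
theorem count_consecutive_nans_py_spec : Claim_equal_count_consecutive_nans_py := by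
  intro l _
  unfold Spec_count_consecutive_nans_py count_consecutive_nans_py count_consecutive_nans_py_alt
  rw [foldA_inv l 0 0 le_rfl le_rfl, pvRuns_split l]
  have h1 := pvRuns_nonneg (l.dropWhile (fun b => b))
  have h2 : (0:Int) ≤ ((l.takeWhile (fun b => b)).length : Int) := by positivity
  omega
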